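-- pv_equiv track=rewrite | github.com/mohsenhariri/scorio | scorio/utils.py | comb_unrank_lex
-- ===== SOURCE A (Python) =====
-- import math
--
-- def comb_unrank_lex(r: int, n: int, k: int):
--     """
--     Unrank the r-th k-combination of {0..n-1} in lexicographic order.
--
--     Args:
--         r: Combination rank
--         n: Size of ground set
--         k: Size of combination
--
--     Returns:
--         Sorted list of k integers
--
--     Raises:
--         ValueError: If rank is out of range
--     """
--     if k == 0:
--         return []
--     if r < 0 or r >= math.comb(n, k):
--         raise ValueError("Combination rank out of range.")
--     combo = []
--     x = 0
--     for pos in range(k):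
--         rem = k - pos - 1
--         while True:
--             cnt = math.comb(n - 1 - x, rem) if (n - 1 - x) >= rem else 0
--             if r < cnt:
--                 combo.append(x)
--                 x += 1
--                 break
--             r -= cnt
--             x += 1
--     return combo
-- ===== SOURCE B (Python) =====
-- import math
--
-- def comb_unrank_lex(r: int, n: int, k: int):
--     """Unrank the r-th k-combination of {0..n-1} in lexicographic order.
--
--     Single pass over candidate elements, updating the binomial count
--     incrementally instead of recomputing math.comb at every step.
--     """
--     if k == 0:
--         return []
--     if r < 0 or r >= math.comb(n, k):
--         raise ValueError("Combination rank out of range.")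
--     combo = []
--     x = 0
--     j = k - 1                       # elements still needed after the current pick
--     cnt = math.comb(n - 1, k - 1)   # C(n-1-x, j): combos completing a pick of x
--     while len(combo) < k:
--         m = n - 1 - x
--         if r < cnt:
--             combo.append(x)
--             if len(combo) < k:
--                 cnt = cnt * j // m      # C(m-1, j-1), exact division
--                 j -= 1
--         else:
--             r -= cnt
--             cnt = cnt * (m - j) // m    # C(m-1, j), exact division
--         x += 1
--     return combo
-- ===== Notes on version B (the rewrite author's own statement) =====
-- stated objective: alternative
-- what changed: Replaces the nested for/while loop that recomputes math.comb(n-1-x, rem) from scratch at every inner step with a single pass over candidate elements that maintains the binomial count incrementally by one exact multiply-divide per step (C(m-1,j-1)=C(m,j)*j/m on a pick, C(m-1,j)=C(m,j)*(m-j)/m on a skip).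
import Mathlib
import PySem

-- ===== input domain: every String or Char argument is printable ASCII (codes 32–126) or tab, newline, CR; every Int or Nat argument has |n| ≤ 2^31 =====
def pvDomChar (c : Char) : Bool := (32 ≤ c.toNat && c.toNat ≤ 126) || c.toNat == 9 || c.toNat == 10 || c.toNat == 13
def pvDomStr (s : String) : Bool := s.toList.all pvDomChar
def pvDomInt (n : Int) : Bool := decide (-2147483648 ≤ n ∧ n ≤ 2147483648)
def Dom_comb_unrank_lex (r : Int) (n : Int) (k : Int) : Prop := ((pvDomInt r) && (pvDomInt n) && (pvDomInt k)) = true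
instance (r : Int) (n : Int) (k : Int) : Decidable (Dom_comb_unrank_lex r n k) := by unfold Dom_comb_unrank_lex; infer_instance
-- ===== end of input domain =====

-- B replaces A's nested for/while loop (math.comb recomputed at each inner step)
-- with a single pass that maintains the binomial count incrementally.


-- ===== PORT A =====
-- math.comb n k; Python raises for negative arguments — those inputs are outside
-- Pre_, the port returns junk 0 there.
def pyComb (n k : Int) : Int :=
  if 0 ≤ n ∧ 0 ≤ k then (Nat.choose n.toNat k.toNat : Int) else 0

-- the 'for pos in range(k)' / inner 'while True' pair of A, flattened to its step
-- relation: each call is one inner-loop iteration (pick ∨ skip); fuel bounds the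
-- total number of x increments (≤ n under Pre_) and is never exhausted inside Pre_.
def combALoop (fuel : Nat) (n k : Int) (r x pos : Int) (combo : List Int) : List Int :=
  match fuel with
  | 0 => combo
  | Nat.succ fuel =>
    if pos < k then
      let rem := k - pos - 1
      let cnt := if n - 1 - x ≥ rem then pyComb (n - 1 - x) rem else 0
      if r < cnt then combALoop fuel n k r (x + 1) (pos + 1) (combo ++ [x])
      else combALoop fuel n k (r - cnt) (x + 1) pos combo
    else combo

def comb_unrank_lex (r : Int) (n : Int) (k : Int) : List Int :=
  if k = 0 then []
  else if r < 0 ∨ r ≥ pyComb n k then []   -- ValueError in Python; outside Pre_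
  else combALoop (n.toNat + 1) n k r 0 0 []

-- ===== PORT B =====
-- B's single 'while len(combo) < k' loop; one fuel per iteration = per x increment.
def combBLoop (fuel : Nat) (n k : Int) (r x cnt j : Int) (combo : List Int) : List Int :=
  match fuel with
  | 0 => combo
  | Nat.succ fuel =>
    if (combo.length : Int) < k then
      let m := n - 1 - x
      if r < cnt then
        let combo' := combo ++ [x]
        if (combo'.length : Int) < k then
          combBLoop fuel n k r (x + 1) (PySem.Int.floordiv (cnt * j) m) (j - 1) combo'
        else
          combBLoop fuel n k r (x + 1) cnt j combo'
      else
        combBLoop fuel n k (r - cnt) (x + 1) (PySem.Int.floordiv (cnt * (m - j)) m) j combo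
    else combo

def comb_unrank_lex_alt (r : Int) (n : Int) (k : Int) : List Int :=
  if k = 0 then []
  else if r < 0 ∨ r ≥ pyComb n k then []   -- ValueError in Python; outside Pre_
  else combBLoop (n.toNat + 1) n k r 0 (pyComb (n - 1) (k - 1)) (k - 1) []

-- ===== PRECONDITION & SPEC =====
-- Pre_ excludes exactly the inputs where A raises: math.comb on a negative
-- argument (n < 0 or k < 0 with k ≠ 0) and ranks out of range (ValueError).
def Pre_comb_unrank_lex (r : Int) (n : Int) (k : Int) : Prop :=
  k = 0 ∨ (0 < k ∧ 0 ≤ n ∧ 0 ≤ r ∧ r < (Nat.choose n.toNat k.toNat : Int))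
instance (r : Int) (n : Int) (k : Int) : Decidable (Pre_comb_unrank_lex r n k) := by
  unfold Pre_comb_unrank_lex; infer_instance

def pvWitness_comb_unrank_lex : Int × Int × Int := (2, 4, 2)

def Spec_comb_unrank_lex (r : Int) (n : Int) (k : Int) (out : List Int) : Prop := out = comb_unrank_lex_alt r n k
instance (r : Int) (n : Int) (k : Int) (out : List Int) : Decidable (Spec_comb_unrank_lex r n k out) := by unfold Spec_comb_unrank_lex; infer_instance

-- ===== CLAIM (what is proved, stated in full; the proofs are below) =====
def Claim_equal_comb_unrank_lex : Prop := ∀ (r : Int) (n : Int) (k : Int), Dom_comb_unrank_lex r n k → Pre_comb_unrank_lex r n k → Spec_comb_unrank_lex r n k (comb_unrank_lex r n k)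

-- ===== LEMMAS AND PROOFS =====

-- j * C(m, j) = m * C(m-1, j-1)  (for 1 ≤ m, 1 ≤ j)
lemma choose_mul_pick (m j : Nat) (hm : 1 ≤ m) (hj : 1 ≤ j) :
    m.choose j * j = m * (m - 1).choose (j - 1) := by
  obtain ⟨m', rfl⟩ : ∃ m', m = m' + 1 := ⟨m - 1, by omega⟩
  obtain ⟨j', rfl⟩ : ∃ j', j = j' + 1 := ⟨j - 1, by omega⟩
  simpa [Nat.mul_comm] using (Nat.add_one_mul_choose_eq m' j').symm

-- (m - j) * C(m, j) = m * C(m-1, j)  (for 1 ≤ m)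
lemma choose_mul_skip (m j : Nat) (hm : 1 ≤ m) :
    m.choose j * (m - j) = m * (m - 1).choose j := by
  by_cases hjm : j ≤ m - 1
  · rcases Nat.eq_zero_or_pos j with rfl | hj
    · simp
    · have hpas : m.choose j = (m - 1).choose (j - 1) + (m - 1).choose j := by
        obtain ⟨m', rfl⟩ : ∃ m', m = m' + 1 := ⟨m - 1, by omega⟩
        obtain ⟨j', rfl⟩ : ∃ j', j = j' + 1 := ⟨j - 1, by omega⟩
        simpa using Nat.choose_succ_succ m' j'
      have hpick := choose_mul_pick m j hm hj
      have hpasI : ((m.choose j : Int)) = (((m-1).choose (j-1) : Nat) : Int) + (((m-1).choose j : Nat) : Int) := by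
        exact_mod_cast congrArg (Nat.cast (R := Int)) hpas
      have hpickI : ((m.choose j : Int)) * (j : Int) = (m : Int) * (((m-1).choose (j-1) : Nat) : Int) := by
        exact_mod_cast hpick
      zify [show j ≤ m by omega]
      linear_combination ((m : Int)) * hpasI - hpickI
  · have h1 : m.choose j * (m - j) = 0 := by
      have : m - j = 0 ∨ m.choose j = 0 := by
        by_cases h : j ≤ m
        · left; omega
        · right; exact Nat.choose_eq_zero_of_lt (by omega)
      rcases this with h | h <;> simp [h]
    have h2 : (m - 1).choose j = 0 := Nat.choose_eq_zero_of_lt (by omega)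
    simp [h1, h2]

lemma floordiv_exact (a b c : Int) (hb : 0 < b) (h : a = b * c) :
    PySem.Int.floordiv a b = c := by
  rw [PySem.Int.floordiv_eq_ediv_of_pos hb, h, Int.mul_ediv_cancel_left _ (by omega)]

-- choose positivity transfer: 0 ≤ r < C(a, b) (as Int) forces b ≤ a
lemma le_of_choose_pos {a b : Nat} {r : Int} (h0 : 0 ≤ r) (h : r < (a.choose b : Int)) :
    b ≤ a := by
  by_contra hlt
  rw [Nat.choose_eq_zero_of_lt (by omega)] at h
  omega

lemma pyComb_eq (n k : Int) (hn : 0 ≤ n) (hk : 0 ≤ k) :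
    pyComb n k = (n.toNat.choose k.toNat : Int) := by
  unfold pyComb; rw [if_pos ⟨hn, hk⟩]

-- Main loop correspondence: with the invariant state, A's flattened nested loop
-- and B's incremental loop take identical steps.
lemma loop_eq (fuel : Nat) : ∀ (n k r x pos : Int) (combo : List Int) (cnt j : Int),
    0 ≤ r → 0 ≤ pos → pos ≤ k → (combo.length : Int) = pos →
    0 ≤ n - x →
    r < pyComb (n - x) (k - pos) →
    (pos < k → cnt = pyComb (n - 1 - x) (k - pos - 1)) →
    (pos < k → j = k - pos - 1) →
    combALoop fuel n k r x pos combo = combBLoop fuel n k r x cnt j combo := by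
  induction fuel with
  | zero => intros; rfl
  | succ fuel ih =>
    intro n k r x pos combo cnt j hr hpos0 hposk hlen hnx hinv hcnt hj
    by_cases hlt : pos < k
    · -- one step; establish facts about the current count
      have hcnt' := hcnt hlt; have hj' := hj hlt
      subst hcnt'; subst hj'
      have hk0 : 0 ≤ k - pos := by omega
      have hcombpos : (0:Int) < pyComb (n - x) (k - pos) := lt_of_le_of_lt hr hinv
      have hle : (k - pos).toNat ≤ (n - x).toNat := by
        apply le_of_choose_pos hr
        rwa [pyComb_eq _ _ hnx hk0] at hinv
      have hmrem : n - 1 - x ≥ k - pos - 1 := by omega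
      have hm0 : 0 ≤ n - 1 - x := by omega
      have hrem0 : 0 ≤ k - pos - 1 := by omega
      have hcntval : pyComb (n - 1 - x) (k - pos - 1)
          = ((n - 1 - x).toNat.choose (k - pos - 1).toNat : Int) :=
        pyComb_eq _ _ hm0 hrem0
      set m : Nat := (n - 1 - x).toNat with hmdef
      set q : Nat := (k - pos - 1).toNat with hqdef
      -- unfold one step of each loop
      rw [combALoop, combBLoop]
      rw [if_pos hlt, if_pos (show (combo.length : Int) < k by rw [hlen]; exact hlt)]
      simp only []
      rw [if_pos hmrem]
      by_cases hpick : r < pyComb (n - 1 - x) (k - pos - 1)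
      · -- pick branch
        rw [if_pos hpick, if_pos hpick]
        have hlen' : ((combo ++ [x]).length : Int) = pos + 1 := by
          simp only [List.length_append, List.length_cons, List.length_nil]; push_cast; omega
        by_cases hlast : pos + 1 < k
        · -- not the last pick: B updates cnt and j
          rw [if_pos (show ((combo ++ [x]).length : Int) < k by rw [hlen']; exact hlast)]
          have hq1 : 1 ≤ q := by omega
          have hmq : q ≤ m := by
            apply le_of_choose_pos hr; rw [← hcntval]; exact hpick
          have hm1 : 1 ≤ m := le_trans hq1 hmq
          have hdiv : PySem.Int.floordiv (pyComb (n - 1 - x) (k - pos - 1) * (k - pos - 1)) (n - 1 - x) =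
              ((m - 1).choose (q - 1) : Int) := by
            apply floordiv_exact _ _ _ (by omega)
            have hid := choose_mul_pick m q hm1 hq1
            rw [hcntval]
            have hjq : (k - pos - 1 : Int) = (q : Int) := by omega
            have hnm : (n - 1 - x : Int) = (m : Int) := by omega
            rw [hjq, hnm]; exact_mod_cast hid
          rw [hdiv]
          apply ih
          · exact hr
          · omega
          · omega
          · exact hlen'
          · omega
          · have heq : pyComb (n - (x + 1)) (k - (pos + 1)) = pyComb (n - 1 - x) (k - pos - 1) := by
              have h1 : n - (x + 1) = n - 1 - x := by ring
              have h2 : k - (pos + 1) = k - pos - 1 := by ring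
              rw [h1, h2]
            rw [heq]; exact hpick
          · intro _
            rw [pyComb_eq _ _ (by omega) (by omega)]
            have h1 : (n - 1 - (x + 1)).toNat = m - 1 := by omega
            have h2 : (k - (pos + 1) - 1).toNat = q - 1 := by omega
            rw [h1, h2]
          · intro _; omega
        · -- last pick: both loops exit at the next check
          rw [if_neg (show ¬ ((combo ++ [x]).length : Int) < k by rw [hlen']; exact hlast)]
          apply ih
          · exact hr
          · omega
          · omega
          · exact hlen'
          · omega
          · have hq0 : q = 0 := by omega
            rw [pyComb_eq _ _ (by omega) (by omega)]
            have h2 : (k - (pos + 1)).toNat = 0 := by omega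
            rw [h2, Nat.choose_zero_right]
            rw [hcntval, hq0, Nat.choose_zero_right] at hpick
            exact hpick
          · intro h; omega
          · intro h; omega
      · -- skip branch
        rw [if_neg hpick, if_neg hpick]
        have hpascal : pyComb (n - x) (k - pos)
            = pyComb (n - 1 - x) (k - pos - 1) + ((m).choose (q + 1) : Int) := by
          rw [pyComb_eq _ _ hnx hk0, hcntval]
          have h1 : (n - x).toNat = m + 1 := by omega
          have h2 : (k - pos).toNat = q + 1 := by omega
          rw [h1, h2]
          exact_mod_cast Nat.choose_succ_succ m q
        have hr' : r - pyComb (n - 1 - x) (k - pos - 1) < ((m).choose (q + 1) : Int) := by omega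
        have hrc0 : 0 ≤ r - pyComb (n - 1 - x) (k - pos - 1) := by omega
        have hmq1 : q + 1 ≤ m := le_of_choose_pos hrc0 hr'
        have hm1 : 1 ≤ m := by omega
        have hdiv : PySem.Int.floordiv
            (pyComb (n - 1 - x) (k - pos - 1) * (n - 1 - x - (k - pos - 1))) (n - 1 - x) =
            ((m - 1).choose q : Int) := by
          apply floordiv_exact _ _ _ (by omega)
          have hid := choose_mul_skip m q hm1
          rw [hcntval]
          have hmj : (n - 1 - x : Int) - (k - pos - 1) = ((m - q : Nat) : Int) := by omega
          have hnm : (n - 1 - x : Int) = (m : Int) := by omega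
          rw [hmj, hnm]; exact_mod_cast hid
        rw [hdiv]
        apply ih
        · exact hrc0
        · exact hpos0
        · exact hposk
        · exact hlen
        · omega
        · have heq : pyComb (n - (x + 1)) (k - pos) = ((m).choose (q + 1) : Int) := by
            rw [pyComb_eq _ _ (by omega) hk0]
            have h1 : (n - (x + 1)).toNat = m := by omega
            have h2 : (k - pos).toNat = q + 1 := by omega
            rw [h1, h2]
          rw [heq]; exact hr'
        · intro _
          rw [pyComb_eq _ _ (by omega) hrem0]
          have h1 : (n - 1 - (x + 1)).toNat = m - 1 := by omega
          have h2 : (k - pos - 1).toNat = q := rfl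
          rw [h1, h2]
        · intro _; omega
    · -- pos = k: both loops exit
      rw [combALoop, combBLoop]
      rw [if_neg hlt, if_neg (show ¬ (combo.length : Int) < k by rw [hlen]; exact hlt)]

-- ===== VERDICT (by name: the statement is the Claim_ definition above) =====
theorem comb_unrank_lex_spec : Claim_equal_comb_unrank_lex := by
  intro r n k _ hpre
  unfold Spec_comb_unrank_lex comb_unrank_lex comb_unrank_lex_alt
  by_cases hk : k = 0
  · simp [hk]
  · rw [if_neg hk, if_neg hk]
    rcases hpre with hk0 | ⟨hkpos, hn0, hr0, hrlt⟩
    · exact absurd hk0 hk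
    have hcomb : pyComb n k = ((n.toNat).choose (k.toNat) : Int) := by
      simp [pyComb, hn0, le_of_lt hkpos]
    by_cases hraise : r < 0 ∨ r ≥ pyComb n k
    · rw [if_pos hraise, if_pos hraise]
    · rw [if_neg hraise, if_neg hraise]
      apply loop_eq
      · exact hr0
      · omega
      · omega
      · rfl
      · omega
      · simpa [sub_zero, hcomb] using (by rw [hcomb]; exact hrlt : r < pyComb n k)
      · intro _; norm_num
      · intro _; omega
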